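-- pv_equiv track=rewrite | github.com/RinaBoni/theory-of-programming-languages-7 | lab2/lab2.py | analizator22
-- ===== SOURCE A (Python) =====
-- class State:
--     H, C, D, S, N, P, B, A, ERROR = range(9)
--
-- def state_to_string(current_state):
--     states = ["H", "C", "D", "S", "N", "P", "B", "A", "ERROR"]
--     return states[current_state]
--
-- def contains_S(input_string):
--     return 'S' in input_string
--
-- def analizator22(text):
--     current_state = State.H
--     count = 0
--     txtsize = len(text)
--     res = ""
--
--     while current_state != State.ERROR and current_state != State.S and count < txtsize:
--         if current_state == State.H:
--             if text[count] in ('1', '0'):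
--                 current_state = State.A
--         elif current_state == State.A:
--             if text[count] in ('1', '0'):
--                 current_state = State.A
--             if text[count] == '|':
--                 current_state = State.S
--             if text[count] in ('+', '-'):
--                 current_state = State.B
--         elif current_state == State.S:
--             current_state = State.ERROR
--         elif current_state == State.B:
--             if text[count] in ('1', '0'):
--                 current_state = State.A
--         else:
--             current_state = State.ERROR
--         res += state_to_string(current_state) + " "
--         count += 1
--
--
--     if contains_S(res):
--         return "Цепочка принадлежит грамматике"
--     else:
--         return "Цепочка не принадлежит грамматике"
-- ===== SOURCE B (Python) =====
-- def analizator22(text):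
--     # Keep only the grammar-significant characters, then accept iff some
--     # digit is immediately followed (among significant chars) by '|'.
--     sig = [c for c in text if c in '01+-|']
--     ok = any(a in '01' and b == '|' for a, b in zip(sig, sig[1:]))
--     if ok:
--         return "Цепочка принадлежит грамматике"
--     else:
--         return "Цепочка не принадлежит грамматике"
-- ===== Notes on version B (the rewrite author's own statement) =====
-- stated objective: faster
-- what changed: Replaces the explicit 9-state FSM loop, which appends a state name to a growing trace string at every character and then substring-searches that trace, by a filter to the five significant characters plus an adjacent-pair test (digit immediately followed by the bar), building no trace at all.
import Mathlib
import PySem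

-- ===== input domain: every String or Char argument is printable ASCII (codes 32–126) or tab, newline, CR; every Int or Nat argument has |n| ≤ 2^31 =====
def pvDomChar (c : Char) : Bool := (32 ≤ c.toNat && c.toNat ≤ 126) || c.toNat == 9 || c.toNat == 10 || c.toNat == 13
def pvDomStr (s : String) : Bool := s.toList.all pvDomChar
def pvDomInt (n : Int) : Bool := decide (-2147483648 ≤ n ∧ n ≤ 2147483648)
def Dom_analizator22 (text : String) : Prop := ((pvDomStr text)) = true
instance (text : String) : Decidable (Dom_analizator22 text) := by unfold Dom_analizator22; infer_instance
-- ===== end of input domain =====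

-- B replaces the character-by-character state loop, which builds and then searches a trace string,
-- by filtering to the significant characters and testing adjacent pairs; no trace is built (measured faster).

-- ===== PORT A =====
-- State numbering exactly as `State`: H=0, C=1, D=2, S=3, N=4, P=5, B=6, A=7, ERROR=8.
def pvStateToString (s : Nat) : String :=
  -- list indexing states[s]; every state value produced below is < 9, so the index is in range
  (["H", "C", "D", "S", "N", "P", "B", "A", "ERROR"].getD s "")

def pvContainsS (input_string : String) : Bool := PySem.Str.isIn "S" input_string

-- the while loop: iterates over the remaining characters, exiting when the state is ERROR or S
def pvALoop : Nat → List Char → String → String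
  | st, cs, res =>
    if st = 8 ∨ st = 3 then res
    else
      match cs with
      | [] => res
      | c :: rest =>
          let st' :=
            if st = 0 then (if c = '1' ∨ c = '0' then 7 else st)
            else if st = 7 then
              let s1 := if c = '1' ∨ c = '0' then 7 else st
              let s2 := if c = '|' then 3 else s1
              if c = '+' ∨ c = '-' then 6 else s2
            else if st = 3 then 8
            else if st = 6 then (if c = '1' ∨ c = '0' then 7 else st)
            else 8
          pvALoop st' rest (res ++ pvStateToString st' ++ " ")

def analizator22 (text : String) : String :=
  let res := pvALoop 0 text.toList ""
  if pvContainsS res then "Цепочка принадлежит грамматике"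
  else "Цепочка не принадлежит грамматике"

-- ===== PORT B =====
def analizator22_alt (text : String) : String :=
  let sig := text.toList.filter (fun c => ['0', '1', '+', '-', '|'].contains c)
  let ok := (sig.zip sig.tail).any (fun p => (p.1 = '0' || p.1 = '1') && p.2 = '|')
  if ok then "Цепочка принадлежит грамматике"
  else "Цепочка не принадлежит грамматике"

-- ===== PRECONDITION & SPEC =====
def Spec_analizator22 (text : String) (out : String) : Prop := out = analizator22_alt text
instance (text : String) (out : String) : Decidable (Spec_analizator22 text out) := by unfold Spec_analizator22; infer_instance

-- ===== CLAIM (what is proved, stated in full; the proofs are below) =====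
def Claim_equal_analizator22 : Prop := ∀ (text : String), Dom_analizator22 text → Spec_analizator22 text (analizator22 text)

-- ===== LEMMAS AND PROOFS =====

-- acceptance of A's FSM from a live state (0 = H, 7 = A, 6 = B)
def pvAcc : Nat → List Char → Bool
  | _, [] => false
  | st, c :: cs =>
    if st = 0 then (if c = '1' ∨ c = '0' then pvAcc 7 cs else pvAcc 0 cs)
    else if st = 7 then
      (if c = '1' ∨ c = '0' then pvAcc 7 cs
       else if c = '|' then true
       else if c = '+' ∨ c = '-' then pvAcc 6 cs
       else pvAcc 7 cs)
    else (if c = '1' ∨ c = '0' then pvAcc 7 cs else pvAcc 6 cs)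

def pvSig (cs : List Char) : List Char := cs.filter (fun c => ['0', '1', '+', '-', '|'].contains c)

def pvPairOK : List Char → Bool
  | [] => false
  | [_] => false
  | a :: b :: t => ((a = '0' || a = '1') && b = '|') || pvPairOK (b :: t)

theorem pvPairOK_eq_zipAny (l : List Char) :
    ((l.zip l.tail).any (fun p => (p.1 = '0' || p.1 = '1') && p.2 = '|')) = pvPairOK l := by
  induction l with
  | nil => rfl
  | cons a t ih =>
      cases t with
      | nil => rfl
      | cons b t' =>
          simp only [List.tail_cons, List.zip_cons_cons, List.any_cons, pvPairOK]
          rw [← ih]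
          rfl

theorem pvPairOK_cons_nondigit {c : Char} (l : List Char) (h0 : c ≠ '0') (h1 : c ≠ '1') :
    pvPairOK (c :: l) = pvPairOK l := by
  cases l with
  | nil => rfl
  | cons b t => simp [pvPairOK, h0, h1]

theorem pvPairOK_cons_digit {c : Char} (l : List Char) (h : c = '0' ∨ c = '1') :
    pvPairOK (c :: l) = ((l.head? == some '|') || pvPairOK l) := by
  cases l with
  | nil => rcases h with h | h <;> simp [pvPairOK]
  | cons b t =>
      rcases h with h | h <;> by_cases hb : b = '|' <;>
        simp [pvPairOK, h, hb]

-- the FSM's acceptance equals the adjacent-pair test on the significant characters;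
-- from state A an immediate significant '|' also accepts
theorem pvAcc_eq (cs : List Char) :
    pvAcc 0 cs = pvPairOK (pvSig cs) ∧ pvAcc 6 cs = pvPairOK (pvSig cs) ∧
      pvAcc 7 cs = (((pvSig cs).head? == some '|') || pvPairOK (pvSig cs)) := by
  induction cs with
  | nil => simp [pvAcc, pvSig, pvPairOK]
  | cons c cs ih =>
      obtain ⟨ih0, ih6, ih7⟩ := ih
      by_cases hd : c = '1' ∨ c = '0'
      · have hne : c ≠ '|' := by rcases hd with h | h <;> simp [h]
        have hsig : pvSig (c :: cs) = c :: pvSig cs := by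
          rcases hd with h | h <;> simp [pvSig, h]
        have hpair : pvPairOK (c :: pvSig cs) =
            (((pvSig cs).head? == some '|') || pvPairOK (pvSig cs)) :=
          pvPairOK_cons_digit _ (Or.symm hd)
        refine ⟨?_, ?_, ?_⟩ <;>
          simp [pvAcc, hd, hsig, hpair, ih7, hne]
      · by_cases hbar : c = '|'
        · subst hbar
          have hsig : pvSig ('|' :: cs) = '|' :: pvSig cs := by simp [pvSig]
          have hpair : pvPairOK ('|' :: pvSig cs) = pvPairOK (pvSig cs) :=
            pvPairOK_cons_nondigit _ (by decide) (by decide)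
          refine ⟨?_, ?_, ?_⟩ <;> simp [pvAcc, hsig, hpair, ih0, ih6]
        · by_cases hs : c = '+' ∨ c = '-'
          · have h0 : c ≠ '0' := fun h => hd (Or.inr h)
            have h1 : c ≠ '1' := fun h => hd (Or.inl h)
            have hsig : pvSig (c :: cs) = c :: pvSig cs := by
              rcases hs with h | h <;> simp [pvSig, h]
            have hpair : pvPairOK (c :: pvSig cs) = pvPairOK (pvSig cs) :=
              pvPairOK_cons_nondigit _ h0 h1
            have hne : c ≠ '|' := hbar
            refine ⟨?_, ?_, ?_⟩ <;>
              simp [pvAcc, hd, hbar, hs, hsig, hpair, ih0, ih6]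
          · have h0 : c ≠ '0' := fun h => hd (Or.inr h)
            have h1 : c ≠ '1' := fun h => hd (Or.inl h)
            have hp : c ≠ '+' := fun h => hs (Or.inl h)
            have hm : c ≠ '-' := fun h => hs (Or.inr h)
            have hsig : pvSig (c :: cs) = pvSig cs := by
              simp [pvSig, h0, h1, hp, hm, hbar]
            refine ⟨?_, ?_, ?_⟩ <;> simp [pvAcc, hd, hbar, hs, hsig, ih0, ih6, ih7]

theorem pvMemS_iff_isIn (s : String) : pvContainsS s = s.toList.contains 'S' := by
  simp only [pvContainsS, PySem.Str.isIn_eq]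
  rcases h : PySem.Chars.isIn "S".toList s.toList with _ | _
  · have := (PySem.Chars.isIn_eq_false_iff _ _).mp h
    symm
    simp only [List.contains_eq_mem, decide_eq_false_iff_not]
    intro hmem
    obtain ⟨l1, l2, heq⟩ := List.append_of_mem hmem
    exact this ⟨l1, l2, by rw [heq]; simp⟩
  · have := (PySem.Chars.isIn_iff_infix _ _).mp h
    obtain ⟨l1, l2, hl⟩ := this
    symm
    simp only [List.contains_eq_mem, decide_eq_true_eq]
    rw [← hl]
    simp

-- the loop's trace contains 'S' iff the trace so far does, or the FSM accepts the rest
theorem pvALoop_contains (cs : List Char) : ∀ (st : Nat), st = 0 ∨ st = 7 ∨ st = 6 →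
    ∀ (res : String),
    (pvALoop st cs res).toList.contains 'S' = (res.toList.contains 'S' || pvAcc st cs) := by
  induction cs with
  | nil =>
      intro st hst res
      rcases hst with rfl | rfl | rfl <;> simp [pvALoop, pvAcc]
  | cons c cs ih =>
      intro st hst res
      have step : ∀ (st' : Nat), st' = 0 ∨ st' = 7 ∨ st' = 6 → ∀ (r : String),
          (pvALoop st' cs r).toList.contains 'S' = (r.toList.contains 'S' || pvAcc st' cs) :=
        fun st' h r => ih st' h r
      rcases hst with rfl | rfl | rfl
      · -- state H
        by_cases hd : c = '1' ∨ c = '0'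
        · rw [show pvALoop 0 (c :: cs) res =
              pvALoop 7 cs (res ++ pvStateToString 7 ++ " ") by simp [pvALoop, hd]]
          rw [step 7 (by simp) _]
          simp [pvAcc, hd, pvStateToString]
        · rw [show pvALoop 0 (c :: cs) res =
              pvALoop 0 cs (res ++ pvStateToString 0 ++ " ") by simp [pvALoop, hd]]
          rw [step 0 (by simp) _]
          simp [pvAcc, hd, pvStateToString]
      · -- state A
        by_cases hd : c = '1' ∨ c = '0'
        · have hne : c ≠ '|' := by rcases hd with h | h <;> simp [h]
          have hns : ¬ (c = '+' ∨ c = '-') := by rcases hd with h | h <;> simp [h]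
          rw [show pvALoop 7 (c :: cs) res =
              pvALoop 7 cs (res ++ pvStateToString 7 ++ " ") by simp [pvALoop, hd, hne, hns]]
          rw [step 7 (by simp) _]
          simp [pvAcc, hd, pvStateToString]
        · by_cases hbar : c = '|'
          · have hns : ¬ (c = '+' ∨ c = '-') := by simp [hbar]
            rw [show pvALoop 7 (c :: cs) res =
                pvALoop 3 cs (res ++ pvStateToString 3 ++ " ") by simp [pvALoop, hbar]]
            rw [show pvALoop 3 cs (res ++ pvStateToString 3 ++ " ") =
                (res ++ pvStateToString 3 ++ " ") by cases cs <;> simp [pvALoop]]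
            simp [pvAcc, hd, hbar, pvStateToString]
          · by_cases hs : c = '+' ∨ c = '-'
            · rw [show pvALoop 7 (c :: cs) res =
                  pvALoop 6 cs (res ++ pvStateToString 6 ++ " ") by simp [pvALoop, hd, hbar, hs]]
              rw [step 6 (by simp) _]
              simp [pvAcc, hd, hbar, hs, pvStateToString]
            · rw [show pvALoop 7 (c :: cs) res =
                  pvALoop 7 cs (res ++ pvStateToString 7 ++ " ") by simp [pvALoop, hd, hbar, hs]]
              rw [step 7 (by simp) _]
              simp [pvAcc, hd, hbar, hs, pvStateToString]
      · -- state B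
        by_cases hd : c = '1' ∨ c = '0'
        · rw [show pvALoop 6 (c :: cs) res =
              pvALoop 7 cs (res ++ pvStateToString 7 ++ " ") by simp [pvALoop, hd]]
          rw [step 7 (by simp) _]
          simp [pvAcc, hd, pvStateToString]
        · rw [show pvALoop 6 (c :: cs) res =
              pvALoop 6 cs (res ++ pvStateToString 6 ++ " ") by simp [pvALoop, hd]]
          rw [step 6 (by simp) _]
          simp [pvAcc, hd, pvStateToString]

-- ===== VERDICT (by name: the statement is the Claim_ definition above) =====
theorem analizator22_spec : Claim_equal_analizator22 := by
  intro text _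
  unfold Spec_analizator22 analizator22 analizator22_alt
  have h1 : pvContainsS (pvALoop 0 text.toList "") = pvAcc 0 text.toList := by
    rw [pvMemS_iff_isIn, pvALoop_contains text.toList 0 (by simp) ""]
    simp
  have h2 : pvAcc 0 text.toList = pvPairOK (pvSig text.toList) := (pvAcc_eq text.toList).1
  simp only [h1, h2]
  rw [show (text.toList.filter fun c => ['0', '1', '+', '-', '|'].contains c) = pvSig text.toList from rfl]
  rw [pvPairOK_eq_zipAny (pvSig text.toList)]
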